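-- pv_equiv track=rewrite | github.com/ketema/Euler_Problems | problem957/compute_actual_gaps.py | tribonacci_pairs
-- ===== SOURCE A (Python) =====
-- def tribonacci_pairs(max_sum):
--     """Generate pairs (i, j) where T_i + T_j ≤ max_sum."""
--     # Generate Tribonacci numbers up to max_sum
--     T = [0, 0, 1]
--     while T[-1] < max_sum:
--         T.append(T[-1] + T[-2] + T[-3])
--
--     pairs = []
--     for i in range(len(T)):
--         for j in range(i, len(T)):
--             if T[i] + T[j] <= max_sum:
--                 pairs.append((i, j))
--
--     return pairs
-- ===== SOURCE B (Python) =====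
-- def _bisect_right(a, x, lo, hi):
--     """Rightmost insertion point for x in sorted a[lo:hi] (hand-rolled binary search)."""
--     while lo < hi:
--         mid = (lo + hi) // 2
--         if a[mid] <= x:
--             lo = mid + 1
--         else:
--             hi = mid
--     return lo
--
--
-- def tribonacci_pairs(max_sum):
--     """Generate pairs (i, j) where T_i + T_j <= max_sum."""
--     T = [0, 0, 1]
--     while T[-1] < max_sum:
--         T.append(T[-1] + T[-2] + T[-3])
--     pairs = []
--     for i, t in enumerate(T):
--         k = _bisect_right(T, max_sum - t, i, len(T))
--         pairs.extend((i, j) for j in range(i, k))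
--     return pairs
-- ===== Notes on version B (the rewrite author's own statement) =====
-- stated objective: faster
-- what changed: The quadratic inner scan over all j is replaced by a hand-rolled bisect_right binary search into the non-decreasing Tribonacci list, so each row of pairs is emitted as one contiguous index range.
import Mathlib
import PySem

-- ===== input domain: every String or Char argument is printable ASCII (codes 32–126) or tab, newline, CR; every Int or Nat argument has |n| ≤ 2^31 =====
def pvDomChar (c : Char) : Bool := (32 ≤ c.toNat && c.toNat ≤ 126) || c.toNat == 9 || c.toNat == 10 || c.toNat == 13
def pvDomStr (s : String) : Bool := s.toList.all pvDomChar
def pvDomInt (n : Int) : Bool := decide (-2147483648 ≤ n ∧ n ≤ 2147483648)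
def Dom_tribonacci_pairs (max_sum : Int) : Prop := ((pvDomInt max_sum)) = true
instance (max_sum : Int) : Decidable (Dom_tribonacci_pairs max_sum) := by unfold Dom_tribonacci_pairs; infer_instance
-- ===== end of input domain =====

-- B replaces A's quadratic inner scan by a binary search (hand-rolled bisect_right) into the
-- non-decreasing Tribonacci list, emitting each row as a contiguous index range.

-- ===== PORT A =====
-- the while-loop 'while T[-1] < max_sum: T.append(T[-1]+T[-2]+T[-3])', carrying the last three
-- elements (a,b,c) = (T[-3],T[-2],T[-1]); the inequality arguments only justify termination.
def tribLoop (max_sum : Int) (T : List Int) (a b c : Int)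
    (ha : 0 ≤ a) (hab : a ≤ b) (hbc : b ≤ c) (hc : 1 ≤ c) : List Int :=
  if _h : c < max_sum then
    tribLoop max_sum (T ++ [a + b + c]) b c (a + b + c)
      (le_trans ha hab) hbc (by omega) (by omega)
  else T
termination_by (2 * max_sum - b - c).toNat
decreasing_by omega

-- T = [0, 0, 1] extended while T[-1] < max_sum (shared verbatim by A and B, as in the Pythons)
def tribT (max_sum : Int) : List Int :=
  tribLoop max_sum [0, 0, 1] 0 0 1 (by omega) (by omega) (by omega) (by omega)

def tribonacci_pairs (max_sum : Int) : List (Int × Int) :=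
  let T := tribT max_sum
  (PySem.List.pyRange 0 (T.length : Int)).foldl (fun pairs i =>
    (PySem.List.pyRange i (T.length : Int)).foldl (fun pairs j =>
      if PySem.List.pyGetD T i 0 + PySem.List.pyGetD T j 0 ≤ max_sum
      then pairs ++ [(i, j)] else pairs) pairs) []

-- ===== PORT B =====
-- hand-rolled bisect_right from Source B: rightmost insertion point for x in sorted a[lo:hi]
def bisectRight (a : List Int) (x : Int) (lo hi : Int) : Int :=
  if h : lo < hi then
    let mid := PySem.Int.floordiv (lo + hi) 2
    if PySem.List.pyGetD a mid 0 ≤ x then bisectRight a x (mid + 1) hi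
    else bisectRight a x lo mid
  else lo
termination_by (hi - lo).toNat
decreasing_by
  · have h1 := (PySem.Int.le_floordiv_iff_mul_le (a := lo + hi) (b := 2) (q := lo) (by omega)).mpr (by omega)
    omega
  · have h2 := (PySem.Int.floordiv_lt_iff_lt_mul (a := lo + hi) (b := 2) (q := hi) (by omega)).mpr (by omega)
    omega

def tribonacci_pairs_alt (max_sum : Int) : List (Int × Int) :=
  let T := tribT max_sum
  (PySem.List.enumerate T).foldl (fun pairs it =>
    let k := bisectRight T (max_sum - it.2) it.1 (T.length : Int)
    pairs ++ (PySem.List.pyRange it.1 k).map (fun j => (it.1, j))) []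

-- ===== PRECONDITION & SPEC =====
def Spec_tribonacci_pairs (max_sum : Int) (out : List (Int × Int)) : Prop := out = tribonacci_pairs_alt max_sum
instance (max_sum : Int) (out : List (Int × Int)) : Decidable (Spec_tribonacci_pairs max_sum out) := by unfold Spec_tribonacci_pairs; infer_instance

-- ===== CLAIM (what is proved, stated in full; the proofs are below) =====
def Claim_equal_tribonacci_pairs : Prop := ∀ (max_sum : Int), Dom_tribonacci_pairs max_sum → Spec_tribonacci_pairs max_sum (tribonacci_pairs max_sum)

-- ===== LEMMAS AND PROOFS =====

-- the generated list is non-decreasing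
lemma tribLoop_pairwise (max_sum : Int) (T : List Int) (a b c : Int)
    (ha : 0 ≤ a) (hab : a ≤ b) (hbc : b ≤ c) (hc : 1 ≤ c) :
    T.Pairwise (· ≤ ·) → (∀ t ∈ T, t ≤ c) →
    (tribLoop max_sum T a b c ha hab hbc hc).Pairwise (· ≤ ·) := by
  fun_induction tribLoop with
  | case1 T a b c ha hab hbc hc h ih =>
    intro hT hle
    apply ih
    · simp [List.pairwise_append, hT]
      intro t ht
      have := hle t ht; omega
    · intro t ht
      simp at ht
      rcases ht with ht | ht
      · have := hle t ht; omega
      · omega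
  | case2 => intro hT _; exact hT

lemma tribT_pairwise (max_sum : Int) : (tribT max_sum).Pairwise (· ≤ ·) := by
  apply tribLoop_pairwise
  · decide
  · intro t ht; simp at ht; omega

-- index-level monotonicity, with Python indexing
lemma tribT_mono (max_sum : Int) {i j : Int} (h0 : 0 ≤ i) (hij : i ≤ j)
    (hj : j < ((tribT max_sum).length : Int)) :
    PySem.List.pyGetD (tribT max_sum) i 0 ≤ PySem.List.pyGetD (tribT max_sum) j 0 := by
  rw [PySem.List.pyGetD_eq_getElem _ _ h0 (by omega),
      PySem.List.pyGetD_eq_getElem _ _ (by omega) hj]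
  rcases eq_or_lt_of_le hij with h | h
  · simp [h]
  · exact (List.pairwise_iff_getElem.mp (tribT_pairwise max_sum)) i.toNat j.toNat
      (by omega) (by omega) (by omega)

-- binary-search characterisation on a sorted list
lemma bisectRight_spec (T : List Int) (x : Int)
    (hmono : ∀ i j : Int, 0 ≤ i → i ≤ j → j < (T.length : Int) →
      PySem.List.pyGetD T i 0 ≤ PySem.List.pyGetD T j 0) :
    ∀ lo hi : Int, 0 ≤ lo → hi ≤ (T.length : Int) → lo ≤ hi →
    lo ≤ bisectRight T x lo hi ∧ bisectRight T x lo hi ≤ hi ∧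
      ∀ j, lo ≤ j → j < hi → (PySem.List.pyGetD T j 0 ≤ x ↔ j < bisectRight T x lo hi) := by
  intro lo hi
  fun_induction bisectRight T x lo hi with
  | case1 lo hi h mid hmid ih =>
    intro hlo hhi _
    have hmid1 : lo ≤ mid := (PySem.Int.le_floordiv_iff_mul_le (a := lo + hi) (b := 2) (q := lo) (by omega)).mpr (by omega)
    have hmid2 : mid < hi := (PySem.Int.floordiv_lt_iff_lt_mul (a := lo + hi) (b := 2) (q := hi) (by omega)).mpr (by omega)
    obtain ⟨ih1, ih2, ih3⟩ := ih (by omega) hhi (by omega)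
    refine ⟨by omega, ih2, ?_⟩
    intro j hj1 hj2
    by_cases hjm : mid + 1 ≤ j
    · exact ih3 j hjm hj2
    · constructor
      · intro _; omega
      · intro _
        calc PySem.List.pyGetD T j 0 ≤ PySem.List.pyGetD T mid 0 :=
              hmono j mid (by omega) (by omega) (by omega)
          _ ≤ x := hmid
  | case2 lo hi h mid hmid ih =>
    intro hlo hhi _
    have hmid1 : lo ≤ mid := (PySem.Int.le_floordiv_iff_mul_le (a := lo + hi) (b := 2) (q := lo) (by omega)).mpr (by omega)
    have hmid2 : mid < hi := (PySem.Int.floordiv_lt_iff_lt_mul (a := lo + hi) (b := 2) (q := hi) (by omega)).mpr (by omega)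
    obtain ⟨ih1, ih2, ih3⟩ := ih hlo (by omega) (by omega)
    refine ⟨ih1, by omega, ?_⟩
    intro j hj1 hj2
    by_cases hjm : j < mid
    · exact ih3 j hj1 hjm
    · constructor
      · intro hle
        exfalso
        have : PySem.List.pyGetD T mid 0 ≤ PySem.List.pyGetD T j 0 :=
          hmono mid j (by omega) (by omega) (by omega)
        omega
      · intro hlt; omega
  | case3 lo hi h =>
    intro _ _ hlh
    exact ⟨le_refl lo, hlh, fun j hj1 hj2 => by omega⟩

-- a sorted row filters to a contiguous range
lemma row_eq (max_sum : Int) (i : Int) (h0 : 0 ≤ i)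
    (hi : i < ((tribT max_sum).length : Int)) :
    (PySem.List.pyRange i ((tribT max_sum).length : Int)).filter
      (fun j => decide (PySem.List.pyGetD (tribT max_sum) i 0 + PySem.List.pyGetD (tribT max_sum) j 0 ≤ max_sum))
    = PySem.List.pyRange i (bisectRight (tribT max_sum) (max_sum - PySem.List.pyGetD (tribT max_sum) i 0) i ((tribT max_sum).length : Int)) := by
  set T := tribT max_sum with hT
  set n : Int := (T.length : Int) with hn
  set x : Int := max_sum - PySem.List.pyGetD T i 0 with hx
  obtain ⟨hk1, hk2, hk3⟩ := bisectRight_spec T x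
    (fun a b h1 h2 h3 => tribT_mono max_sum h1 h2 h3) i n h0 (le_refl n) (le_of_lt hi)
  set k : Int := bisectRight T x i n with hkdef
  rw [PySem.List.pyRange_one_append i k n hk1 hk2, List.filter_append]
  have h1 : (PySem.List.pyRange i k).filter
      (fun j => decide (PySem.List.pyGetD T i 0 + PySem.List.pyGetD T j 0 ≤ max_sum))
      = PySem.List.pyRange i k := by
    apply List.filter_eq_self.mpr
    intro j hj
    rw [PySem.List.mem_pyRange_one] at hj
    simp only [decide_eq_true_eq]
    have := (hk3 j hj.1 (by omega)).mpr hj.2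
    omega
  have h2 : (PySem.List.pyRange k n).filter
      (fun j => decide (PySem.List.pyGetD T i 0 + PySem.List.pyGetD T j 0 ≤ max_sum))
      = [] := by
    apply List.filter_eq_nil_iff.mpr
    intro j hj
    rw [PySem.List.mem_pyRange_one] at hj
    simp only [decide_eq_true_eq, not_le]
    by_contra hc
    push Not at hc
    have := (hk3 j (by omega) hj.2).mp (by omega)
    omega
  rw [h1, h2, List.append_nil]

-- ===== VERDICT (by name: the statement is the Claim_ definition above) =====
theorem tribonacci_pairs_spec : Claim_equal_tribonacci_pairs := by
  intro max_sum _
  unfold Spec_tribonacci_pairs tribonacci_pairs tribonacci_pairs_alt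
  simp only []
  set T := tribT max_sum with hT
  set n : Int := (T.length : Int) with hn
  -- A side: inner loop is a filtered row, outer loop a flatMap
  rw [PySem.List.foldl_congr_mem _ _
      (fun pairs i => pairs ++
        ((PySem.List.pyRange i n).filter
          (fun j => decide (PySem.List.pyGetD T i 0 + PySem.List.pyGetD T j 0 ≤ max_sum))).map
          (fun j => ((i : Int), j)))
      _ (by
        intro acc i _
        exact PySem.List.foldl_append_ite
          (fun j => PySem.List.pyGetD T i 0 + PySem.List.pyGetD T j 0 ≤ max_sum)
          (fun j => (i, j)) _ acc)]
  rw [PySem.List.foldl_append_eq_flatMap]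
  -- B side: enumerate as a map over the index range, then a flatMap
  rw [PySem.List.enumerate_eq_map_pyRange T 0]
  rw [PySem.List.foldl_congr_mem _ _
      (fun pairs it => pairs ++
        (PySem.List.pyRange it.1 (bisectRight T (max_sum - it.2) it.1 n)).map
          (fun j => (it.1, j)))
      _ (by intro acc it _; rfl)]
  rw [PySem.List.foldl_append_eq_flatMap, List.flatMap_map]
  simp only [List.nil_append, PySem.List.len_eq]
  apply List.flatMap_congr
  intro i hi
  rw [PySem.List.mem_pyRange_one] at hi
  rw [row_eq max_sum i hi.1 hi.2]
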